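-- pv_equiv track=rewrite | github.com/Danilodcn/Python | projetos/Ex_Lista_USP/usp02/usp2.5.py | cubo
-- ===== SOURCE A (Python) =====
-- def soma(lista):
--     s = 0
--     for i in lista:
--         s = s + i
--     return s
--
-- def cubo(n):
--     lista = []
--     i = 0
--     while True:
--         i = i + 1
--         if i % 2 != 0:
--             lista.append(i)
--
--
--         if len(lista) == n:
--             if soma(lista) == n ** 3:
--                 break
--             else: del lista[0]
--     return lista
-- ===== SOURCE B (Python) =====
-- def cubo(n):
--     # The n consecutive odd numbers summing to n**3 are n*n-n+1, ..., n*n+n-1.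
--     return list(range(n * n - n + 1, n * n + n, 2))
-- ===== Notes on version B (the rewrite author's own statement) =====
-- stated objective: faster
-- what changed: Replaces A's unbounded sliding-window search over all odd numbers (append/check-sum/delete-head until the window of n odds sums to n^3) with the closed-form arithmetic range n^2-n+1 .. n^2+n-1 step 2.
import Mathlib
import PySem

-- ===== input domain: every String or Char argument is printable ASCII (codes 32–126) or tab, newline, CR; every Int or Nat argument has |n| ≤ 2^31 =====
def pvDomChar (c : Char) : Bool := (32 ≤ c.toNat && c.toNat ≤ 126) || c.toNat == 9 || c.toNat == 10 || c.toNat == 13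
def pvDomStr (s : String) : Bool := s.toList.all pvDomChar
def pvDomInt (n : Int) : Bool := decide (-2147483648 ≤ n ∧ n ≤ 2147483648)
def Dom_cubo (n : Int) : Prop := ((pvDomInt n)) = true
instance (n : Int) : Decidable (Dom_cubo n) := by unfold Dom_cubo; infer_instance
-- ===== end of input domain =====

-- B replaces A's sliding-window search over the odd numbers by the closed-form range n²−n+1 .. n²+n−1 (step 2): asymptotically faster.

-- ===== PORT A =====
def soma (lista : List Int) : Int := lista.foldl (fun s i => s + i) 0

-- A's 'while True' loop; one fuel unit per iteration.  On Pre_cubo (1 ≤ n) the loop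
-- breaks after exactly n² + n - 1 iterations, so the fuel n² + n never runs out there
-- (proved below); outside Pre_cubo the Python loop never terminates.
def cuboLoop (n : Int) : Nat → List Int → Int → List Int
  | 0, lista, _ => lista
  | f + 1, lista, i =>
    let i' := i + 1
    let lista' := if PySem.Int.mod i' 2 ≠ 0 then lista ++ [i'] else lista
    if (lista'.length : Int) = n then
      if soma lista' = n ^ 3 then lista'
      else cuboLoop n f (lista'.drop 1) i'
    else cuboLoop n f lista' i'

def cubo (n : Int) : List Int := cuboLoop n (n.toNat * n.toNat + n.toNat) [] 0

-- ===== PORT B =====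
def cubo_alt (n : Int) : List Int := PySem.List.pyRange (n * n - n + 1) (n * n + n) 2

-- ===== PRECONDITION & SPEC =====
-- Pre_ excludes n ≤ 0, where the Python A never terminates (the break test len(lista) == n can never fire).
def Pre_cubo (n : Int) : Prop := 1 ≤ n
instance (n : Int) : Decidable (Pre_cubo n) := by unfold Pre_cubo; infer_instance
def pvWitness_cubo : Int := 3

def Spec_cubo (n : Int) (out : List Int) : Prop := out = cubo_alt n
instance (n : Int) (out : List Int) : Decidable (Spec_cubo n out) := by unfold Spec_cubo; infer_instance

-- ===== CLAIM (what is proved, stated in full; the proofs are below) =====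
def Claim_equal_cubo : Prop := ∀ (n : Int), Dom_cubo n → Pre_cubo n → Spec_cubo n (cubo n)

-- ===== LEMMAS AND PROOFS =====

-- `oddsFrom a m` = the m consecutive odd numbers a, a+2, …, a+2(m-1) (for odd a): the window A maintains.
def oddsFrom (a : Int) (m : Nat) : List Int := (List.range m).map (fun (j : Nat) => a + 2 * (j : Int))

lemma oddsFrom_snoc (a : Int) (m : Nat) :
    oddsFrom a (m + 1) = oddsFrom a m ++ [a + 2 * m] := by
  simp [oddsFrom, List.range_succ]

lemma oddsFrom_cons (a : Int) (m : Nat) :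
    oddsFrom a (m + 1) = a :: oddsFrom (a + 2) m := by
  induction m generalizing a with
  | zero => simp [oddsFrom]
  | succ m ih =>
    rw [oddsFrom_snoc, ih, oddsFrom_snoc, List.cons_append]
    push_cast; ring_nf

lemma length_oddsFrom (a : Int) (m : Nat) : (oddsFrom a m).length = m := by
  simp [oddsFrom]

lemma soma_append_singleton (l : List Int) (x : Int) : soma (l ++ [x]) = soma l + x := by
  simp [soma, List.foldl_append]

lemma soma_oddsFrom (a : Int) (m : Nat) :
    soma (oddsFrom a m) = m * a + m * (m - 1) := by
  induction m with
  | zero => simp [soma, oddsFrom]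
  | succ m ih =>
    rw [oddsFrom_snoc, soma_append_singleton, ih]
    push_cast; ring

lemma mod_two_odd (k : Int) : PySem.Int.mod (2 * k + 1) 2 = 1 := by
  rw [PySem.Int.mod_eq_emod_of_pos (by norm_num)]; omega

lemma mod_two_even (k : Int) : PySem.Int.mod (2 * k) 2 = 0 := by
  rw [PySem.Int.mod_eq_emod_of_pos (by norm_num)]; omega

-- One iteration at an even counter 2k: appends the odd number 2k+1, then runs A's window test.
lemma step_odd (n : Int) (L : List Int) (k : Int) (f : Nat) :
    cuboLoop n (f + 1) L (2 * k) =
      if ((L ++ [2 * k + 1]).length : Int) = n then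
        (if soma (L ++ [2 * k + 1]) = n ^ 3 then L ++ [2 * k + 1]
         else cuboLoop n f ((L ++ [2 * k + 1]).drop 1) (2 * k + 1))
      else cuboLoop n f (L ++ [2 * k + 1]) (2 * k + 1) := by
  have hodd : PySem.Int.mod (2 * k + 1) 2 ≠ 0 := by rw [mod_two_odd]; norm_num
  simp only [cuboLoop, hodd, if_true, ne_eq, not_false_eq_true]

-- One iteration at an odd counter 2k+1: no append; if the window is not full nothing happens.
lemma step_even (n : Int) (L : List Int) (k : Int) (f : Nat) (hlen : (L.length : Int) ≠ n) :
    cuboLoop n (f + 1) L (2 * k + 1) = cuboLoop n f L (2 * k + 2) := by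
  have heven : ¬ (PySem.Int.mod (2 * k + 1 + 1) 2 ≠ 0) := by
    rw [show (2 * k + 1 + 1 : Int) = 2 * (k + 1) by ring, mod_two_even]; simp
  simp only [cuboLoop, heven, ite_false, if_neg hlen]
  rw [show (2 * k + 1 + 1 : Int) = 2 * k + 2 by ring]

-- Build-up phase: the first 2m iterations (m < N) just collect the first m odd numbers.
lemma phase1 (N : Nat) : ∀ m, m < N → ∀ f,
    cuboLoop (N : Int) (2 * m + f) [] 0 = cuboLoop (N : Int) f (oddsFrom 1 m) (2 * (m : Int)) := by
  intro m
  induction m with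
  | zero => intro _ f; norm_num [oddsFrom]
  | succ m ih =>
    intro hm f
    rw [show 2 * (m + 1) + f = 2 * m + (f + 1 + 1) by ring, ih (Nat.lt_of_succ_lt hm),
        step_odd]
    have hlen : ((oddsFrom 1 m ++ [2 * (m : Int) + 1]).length : Int) ≠ (N : Int) := by
      simp [length_oddsFrom]; omega
    rw [if_neg hlen, show oddsFrom 1 m ++ [2 * (m : Int) + 1] = oddsFrom 1 (m + 1) by
          rw [oddsFrom_snoc]; ring_nf,
        step_even _ _ _ _ (by rw [length_oddsFrom]; omega)]
    push_cast; ring_nf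

-- Sliding phase: from the state before processing the (k+1)-th odd number down to the break.
lemma phase2 (N : Nat) (hN : 1 ≤ N) : ∀ t k f, N - 1 ≤ k → 2 * k + 2 + 2 * t = N * N + N →
    cuboLoop (N : Int) (2 * t + 1 + f) (oddsFrom (2 * (k : Int) - 2 * N + 3) (N - 1)) (2 * (k : Int))
      = oddsFrom ((N : Int) * N - N + 1) N := by
  intro t
  induction t with
  | zero =>
    intro k f hk hsum
    have hNk : ((N : Int) - 1) = ((N - 1 : Nat) : Int) := by omega
    have hsnoc : oddsFrom (2 * (k : Int) - 2 * N + 3) (N - 1) ++ [2 * (k : Int) + 1]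
        = oddsFrom (2 * (k : Int) - 2 * N + 3) ((N - 1) + 1) := by
      rw [oddsFrom_snoc, ← hNk]; ring_nf
    rw [show (2 * 0 + 1 + f : Nat) = f + 1 by ring, step_odd, hsnoc]
    have hlen : ((oddsFrom (2 * (k : Int) - 2 * N + 3) ((N - 1) + 1)).length : Int) = (N : Int) := by
      rw [length_oddsFrom]; omega
    have hsoma : soma (oddsFrom (2 * (k : Int) - 2 * N + 3) ((N - 1) + 1)) = (N : Int) ^ 3 := by
      rw [soma_oddsFrom, show ((N - 1 + 1 : Nat) : Int) = (N : Int) by omega]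
      have h2k : 2 * (k : Int) = (N : Int) * N + N - 2 := by push_cast at hsum ⊢; omega
      rw [h2k]; ring
    rw [if_pos hlen, if_pos hsoma]
    have ha : (2 * (k : Int) - 2 * N + 3) = (N : Int) * N - N + 1 := by
      push_cast at hsum ⊢; omega
    rw [ha, Nat.sub_add_cancel hN]
  | succ t ih =>
    intro k f hk hsum
    have hNk : ((N : Int) - 1) = ((N - 1 : Nat) : Int) := by omega
    have hsnoc : oddsFrom (2 * (k : Int) - 2 * N + 3) (N - 1) ++ [2 * (k : Int) + 1]
        = oddsFrom (2 * (k : Int) - 2 * N + 3) ((N - 1) + 1) := by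
      rw [oddsFrom_snoc, ← hNk]; ring_nf
    rw [show (2 * (t + 1) + 1 + f : Nat) = (2 * t + 1 + (f + 1)) + 1 by ring, step_odd, hsnoc]
    have hlen : ((oddsFrom (2 * (k : Int) - 2 * N + 3) ((N - 1) + 1)).length : Int) = (N : Int) := by
      rw [length_oddsFrom]; omega
    have hsoma : soma (oddsFrom (2 * (k : Int) - 2 * N + 3) ((N - 1) + 1)) ≠ (N : Int) ^ 3 := by
      rw [soma_oddsFrom, show ((N - 1 + 1 : Nat) : Int) = (N : Int) by omega]
      have hlt : (2 * (k : Int) - 2 * N + 3) + ((N : Int) - 1) < (N : Int) * N := by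
        omega
      have hpos : (0 : Int) < N := by omega
      apply ne_of_lt
      nlinarith [mul_lt_mul_of_pos_left hlt hpos]
    rw [if_pos hlen, if_neg hsoma]
    have hdrop : (oddsFrom (2 * (k : Int) - 2 * N + 3) ((N - 1) + 1)).drop 1
        = oddsFrom (2 * (k : Int) - 2 * N + 3 + 2) (N - 1) := by
      rw [oddsFrom_cons]; rfl
    rw [hdrop, show 2 * t + 1 + (f + 1) = (2 * t + 1 + f) + 1 by ring,
        step_even _ _ _ _ (by rw [length_oddsFrom]; omega)]
    have := ih (k + 1) f (by omega) (by omega)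
    push_cast at this
    rw [show (2 * (k : Int) - 2 * (N : Int) + 3 + 2) = 2 * (k : Int) + 2 - 2 * (N : Int) + 3 by ring]
    exact this

lemma cubo_alt_eq (N : Nat) (hN : 1 ≤ N) :
    cubo_alt (N : Int) = oddsFrom ((N : Int) * N - N + 1) N := by
  unfold cubo_alt
  rw [PySem.List.pyRange_of_pos _ _ (by norm_num)]
  have hab : (N : Int) * N - N + 1 < (N : Int) * N + N := by
    have : (1 : Int) ≤ N := by exact_mod_cast hN
    omega
  rw [if_pos hab,
      show ((N : Int) * N + N - ((N : Int) * N - N + 1) + 2 - 1) = 2 * (N : Int) by ring,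
      Int.mul_ediv_cancel_left _ (by norm_num), Int.toNat_natCast]
  simp only [oddsFrom]

-- ===== VERDICT (by name: the statement is the Claim_ definition above) =====
theorem cubo_spec : Claim_equal_cubo := by
  intro n _ hpre
  have hpre' : 1 ≤ n := hpre
  show cubo n = cubo_alt n
  obtain ⟨N, rfl⟩ : ∃ N : Nat, (N : Int) = n := ⟨n.toNat, Int.toNat_of_nonneg (by omega)⟩
  have hN : 1 ≤ N := by exact_mod_cast hpre'
  obtain ⟨m, hm⟩ := Nat.even_mul_succ_self (N - 1)
  have hmu : (N - 1) * (N - 1 + 1) = N * N - N := by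
    rw [Nat.sub_add_cancel hN, Nat.sub_mul, Nat.one_mul]
  have hMN : N ≤ N * N := Nat.le_mul_of_pos_left N (by omega)
  have ht : 2 * m = N * N - N := by omega
  have hfuel : N * N + N = 2 * (N - 1) + (2 * m + 1 + 1) := by
    zify [hMN, hN] at ht ⊢; omega
  have hw : oddsFrom 1 (N - 1) = oddsFrom (2 * ((N - 1 : Nat) : Int) - 2 * (N : Int) + 3) (N - 1) := by
    have hc : ((N - 1 : Nat) : Int) = (N : Int) - 1 := by omega
    rw [hc, show (2 * ((N : Int) - 1) - 2 * (N : Int) + 3) = 1 by ring]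
  unfold cubo
  rw [Int.toNat_natCast, hfuel, phase1 N (N - 1) (by omega), hw,
      phase2 N hN m (N - 1) 1 le_rfl (by zify [hMN, hN] at ht ⊢; omega),
      cubo_alt_eq N hN]
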